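-- pv_equiv track=rewrite | github.com/DicksonLegend/AIRA | backend/app/data/compliance_db.py | _get_indian_compliance_timeline
-- ===== SOURCE A (Python) =====
-- from typing import Dict, Any, List, Optional
--
-- def _get_indian_compliance_timeline(regulations: List[Dict[str, Any]]) -> Dict[str, str]:
--     """Get Indian compliance timelines"""
--     timelines = {}
--
--     for regulation in regulations:
--         reg_name = regulation.get("name", "")
--
--         if "Companies Act" in reg_name:
--             timelines["Companies Act 2013"] = "3-6 months"
--         elif "SEBI" in reg_name:
--             timelines["SEBI Compliance"] = "6-12 months"
--         elif "RBI" in reg_name: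
--             timelines["RBI Guidelines"] = "2-4 months"
--         elif "GST" in reg_name:
--             timelines["GST Compliance"] = "1-2 months"
--         elif "IT Act" in reg_name:
--             timelines["IT Act 2000"] = "2-3 months"
--         elif "FEMA" in reg_name:
--             timelines["FEMA Compliance"] = "3-6 months"
--
--     return timelines
-- ===== SOURCE B (Python) =====
-- from typing import Dict, Any, List
--
-- _PATTERNS = ["Companies Act", "SEBI", "RBI", "GST", "IT Act", "FEMA"]
-- _KEYS = ["Companies Act 2013", "SEBI Compliance", "RBI Guidelines",
--          "GST Compliance", "IT Act 2000", "FEMA Compliance"]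
-- _TIMES = ["3-6 months", "6-12 months", "2-4 months",
--           "1-2 months", "2-3 months", "3-6 months"]
--
-- def _get_indian_compliance_timeline(regulations: List[Dict[str, Any]]) -> Dict[str, str]:
--     # pass 1: label each regulation with the smallest matching pattern index (or None)
--     hits = []
--     for regulation in regulations:
--         name = regulation.get("name", "")
--         matches = [i for i, p in enumerate(_PATTERNS) if p in name]
--         hits.append(min(matches) if matches else None)
--     # pass 2: keep the first occurrence of each index, in order
--     order = []
--     for i in hits:
--         if i is not None and i not in order:
--             order.append(i)
--     # pass 3: assemble the result
--     return {_KEYS[i]: _TIMES[i] for i in order}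
-- ===== Notes on version B (the rewrite author's own statement) =====
-- stated objective: alternative
-- what changed: Replaces A's single pass that mutates a dict through an elif cascade by three staged passes: label every regulation with the smallest matching pattern index (collecting all matches and taking min, no short-circuit), dedupe the labels keeping first occurrences, then build the dict from the deduped index list.
import Mathlib
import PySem

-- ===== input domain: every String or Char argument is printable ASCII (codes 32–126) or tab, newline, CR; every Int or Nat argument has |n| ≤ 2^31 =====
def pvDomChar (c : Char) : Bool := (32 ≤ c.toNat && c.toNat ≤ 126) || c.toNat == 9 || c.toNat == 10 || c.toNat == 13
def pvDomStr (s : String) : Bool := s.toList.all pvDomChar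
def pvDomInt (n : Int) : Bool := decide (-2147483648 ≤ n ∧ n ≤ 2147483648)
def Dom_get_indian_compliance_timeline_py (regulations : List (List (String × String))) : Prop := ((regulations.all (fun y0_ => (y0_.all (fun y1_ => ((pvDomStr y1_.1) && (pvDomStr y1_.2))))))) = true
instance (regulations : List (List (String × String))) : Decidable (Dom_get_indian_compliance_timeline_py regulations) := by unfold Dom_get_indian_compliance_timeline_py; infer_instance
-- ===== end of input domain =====

-- B replaces A's incremental elif/dict loop by three staged passes (label each regulation with the smallest matching pattern index, dedupe first occurrences, then assemble the dict); alternative decomposition, same cost.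


-- ===== PORT A =====
-- A: elif cascade over the regulation name, dict accumulated across the loop
def pvStepA (d : PySem.Dict String String) (regulation : List (String × String)) : PySem.Dict String String :=
  let reg_name := (PySem.Dict.mk regulation).getD "name" ""
  if PySem.Str.isIn "Companies Act" reg_name then d.insert "Companies Act 2013" "3-6 months"
  else if PySem.Str.isIn "SEBI" reg_name then d.insert "SEBI Compliance" "6-12 months"
  else if PySem.Str.isIn "RBI" reg_name then d.insert "RBI Guidelines" "2-4 months"
  else if PySem.Str.isIn "GST" reg_name then d.insert "GST Compliance" "1-2 months"
  else if PySem.Str.isIn "IT Act" reg_name then d.insert "IT Act 2000" "2-3 months"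
  else if PySem.Str.isIn "FEMA" reg_name then d.insert "FEMA Compliance" "3-6 months"
  else d

def get_indian_compliance_timeline_py (regulations : List (List (String × String))) : List (String × String) :=
  (regulations.foldl pvStepA PySem.Dict.empty).items

-- ===== PORT B =====
def pvPatterns : List String := ["Companies Act", "SEBI", "RBI", "GST", "IT Act", "FEMA"]
def pvKeys : List String := ["Companies Act 2013", "SEBI Compliance", "RBI Guidelines",
                             "GST Compliance", "IT Act 2000", "FEMA Compliance"]
def pvTimes : List String := ["3-6 months", "6-12 months", "2-4 months",
                              "1-2 months", "2-3 months", "3-6 months"]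

-- _KEYS[i] / _TIMES[i]: the indices used are always 0..5, where pyGetD is exact
def pvKey (i : Int) : String := PySem.List.pyGetD pvKeys i ""
def pvTime (i : Int) : String := PySem.List.pyGetD pvTimes i ""

-- pass 1 body: min(matches) if matches else None (PySem.List.min? is none exactly on [])
def pvClassify (regulation : List (String × String)) : Option Int :=
  let name := (PySem.Dict.mk regulation).getD "name" ""
  let ms := ((PySem.List.enumerate pvPatterns).filter (fun ip => PySem.Str.isIn ip.2 name)).map (·.1)
  PySem.List.min? ms id

-- pass 2 body: if i is not None and i not in order: order.append(i)
def pvDedupStep (order : List Int) (oi : Option Int) : List Int :=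
  match oi with
  | some i => if i ∈ order then order else order ++ [i]
  | none => order

def get_indian_compliance_timeline_py_alt (regulations : List (List (String × String))) : List (String × String) :=
  let hits := regulations.map pvClassify
  let order := hits.foldl pvDedupStep []
  (order.foldl (fun d i => d.insert (pvKey i) (pvTime i)) PySem.Dict.empty).items

-- ===== PRECONDITION & SPEC =====
def Spec_get_indian_compliance_timeline_py (regulations : List (List (String × String))) (out : List (String × String)) : Prop := out = get_indian_compliance_timeline_py_alt regulations
instance (regulations : List (List (String × String))) (out : List (String × String)) : Decidable (Spec_get_indian_compliance_timeline_py regulations out) := by unfold Spec_get_indian_compliance_timeline_py; infer_instance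

-- ===== CLAIM =====
def Claim_equal_get_indian_compliance_timeline_py : Prop := ∀ (regulations : List (List (String × String))), Dom_get_indian_compliance_timeline_py regulations → Spec_get_indian_compliance_timeline_py regulations (get_indian_compliance_timeline_py regulations)

-- ===== LEMMAS AND PROOFS =====
def pvMkDict (order : List Int) : PySem.Dict String String :=
  order.foldl (fun d i => d.insert (pvKey i) (pvTime i)) PySem.Dict.empty

def pvStepB (d : PySem.Dict String String) (oi : Option Int) : PySem.Dict String String :=
  match oi with
  | some i => d.insert (pvKey i) (pvTime i)
  | none => d

theorem pvStepA_eq (d : PySem.Dict String String) (reg : List (String × String)) :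
    pvStepA d reg = pvStepB d (pvClassify reg) := by
  unfold pvStepA pvClassify pvPatterns
  set name := (PySem.Dict.mk reg).getD "name" "" with hname
  cases h1 : PySem.Str.isIn "Companies Act" name <;>
  cases h2 : PySem.Str.isIn "SEBI" name <;>
  cases h3 : PySem.Str.isIn "RBI" name <;>
  cases h4 : PySem.Str.isIn "GST" name <;>
  cases h5 : PySem.Str.isIn "IT Act" name <;>
  cases h6 : PySem.Str.isIn "FEMA" name <;>
  simp [PySem.Str.isIn] at h1 h2 h3 h4 h5 h6 <;>
  simp [PySem.List.enumerate, PySem.List.min?, PySem.Str.isIn, h1, h2, h3, h4, h5, h6,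
        pvStepB, pvKey, pvTime, pvKeys, pvTimes, PySem.List.pyGetD]

theorem pvClassify_range (reg : List (String × String)) (i : Int) (h : pvClassify reg = some i) :
    0 ≤ i ∧ i < 6 := by
  unfold pvClassify pvPatterns at h
  set name := (PySem.Dict.mk reg).getD "name" "" with hname
  cases h1 : PySem.Str.isIn "Companies Act" name <;>
  cases h2 : PySem.Str.isIn "SEBI" name <;>
  cases h3 : PySem.Str.isIn "RBI" name <;>
  cases h4 : PySem.Str.isIn "GST" name <;>
  cases h5 : PySem.Str.isIn "IT Act" name <;>
  cases h6 : PySem.Str.isIn "FEMA" name <;>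
  simp [PySem.Str.isIn] at h1 h2 h3 h4 h5 h6 <;>
  simp [PySem.List.enumerate, PySem.List.min?, PySem.Str.isIn, h1, h2, h3, h4, h5, h6] at h <;> omega

theorem pvKey_inj (i j : Int) (hi0 : 0 ≤ i) (hi : i < 6) (hj0 : 0 ≤ j) (hj : j < 6)
    (h : pvKey i = pvKey j) : i = j := by
  interval_cases i <;> interval_cases j <;> simp_all [pvKey, pvKeys, PySem.List.pyGetD]

theorem pvItems_mkDict (order : List Int) (hnd : order.Nodup)
    (hr : ∀ i ∈ order, 0 ≤ i ∧ i < 6) :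
    (pvMkDict order).items = order.map (fun i => (pvKey i, pvTime i)) := by
  unfold pvMkDict
  rw [PySem.Dict.items_foldl_insert_fresh]
  · rfl
  · intro a _; simp [PySem.Dict.contains_empty]
  · exact hnd.map_on (fun x hx y hy hxy =>
      pvKey_inj x y (hr x hx).1 (hr x hx).2 (hr y hy).1 (hr y hy).2 hxy)

theorem pvInsert_mem (order : List Int) (i : Int) (hnd : order.Nodup)
    (hr : ∀ j ∈ order, 0 ≤ j ∧ j < 6) (hi0 : 0 ≤ i) (hi : i < 6) (hmem : i ∈ order) :
    (pvMkDict order).insert (pvKey i) (pvTime i) = pvMkDict order := by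
  apply PySem.Dict.ext
  have hitems := pvItems_mkDict order hnd hr
  have hcont : (pvMkDict order).contains (pvKey i) = true := by
    rw [PySem.Dict.contains_iff_mem_keys]
    simp only [PySem.Dict.keys, hitems, List.map_map]
    exact List.mem_map.mpr ⟨i, hmem, rfl⟩
  rw [PySem.Dict.items_insert_of_contains _ _ hcont, hitems, List.map_map]
  apply List.map_congr_left
  intro j hj
  simp only [Function.comp]
  by_cases hk : pvKey j = pvKey i
  · have : j = i := pvKey_inj j i (hr j hj).1 (hr j hj).2 hi0 hi hk
    subst this; simp
  · simp [hk]

theorem pvFold_sim (hits : List (Option Int)) (order : List Int)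
    (hnd : order.Nodup) (hr : ∀ i ∈ order, 0 ≤ i ∧ i < 6)
    (hh : ∀ oi ∈ hits, ∀ i, oi = some i → 0 ≤ i ∧ i < 6) :
    hits.foldl pvStepB (pvMkDict order) = pvMkDict (hits.foldl pvDedupStep order) := by
  induction hits generalizing order with
  | nil => rfl
  | cons oi rest ih =>
    have hh' : ∀ o ∈ rest, ∀ i, o = some i → 0 ≤ i ∧ i < 6 :=
      fun o ho i hoi => hh o (List.mem_cons_of_mem _ ho) i hoi
    cases oi with
    | none => simpa [pvStepB, pvDedupStep] using ih order hnd hr hh'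
    | some i =>
      obtain ⟨hi0, hi⟩ := hh (some i) (List.mem_cons_self) i rfl
      by_cases hmem : i ∈ order
      · simp only [List.foldl_cons, pvStepB, pvDedupStep, if_pos hmem]
        rw [pvInsert_mem order i hnd hr hi0 hi hmem]
        exact ih order hnd hr hh'
      · simp only [List.foldl_cons, pvStepB, pvDedupStep, if_neg hmem]
        have hstep : (pvMkDict order).insert (pvKey i) (pvTime i) = pvMkDict (order ++ [i]) := by
          unfold pvMkDict; rw [List.foldl_append]; rfl
        rw [hstep]
        exact ih (order ++ [i])
          (by rw [List.nodup_append]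
              refine ⟨hnd, List.nodup_singleton i, ?_⟩
              intro a ha b hb
              simp only [List.mem_singleton] at hb
              subst hb
              exact fun h => hmem (h ▸ ha))
          (by intro j hj; rcases List.mem_append.mp hj with h | h
              · exact hr j h
              · simp at h; subst h; exact ⟨hi0, hi⟩)
          hh'

-- ===== VERDICT =====
theorem get_indian_compliance_timeline_py_spec : Claim_equal_get_indian_compliance_timeline_py := by
  intro regulations _
  unfold Spec_get_indian_compliance_timeline_py get_indian_compliance_timeline_py
    get_indian_compliance_timeline_py_alt
  have h1 : regulations.foldl pvStepA PySem.Dict.empty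
      = (regulations.map pvClassify).foldl pvStepB PySem.Dict.empty := by
    have hfe : pvStepA = fun d reg => pvStepB d (pvClassify reg) := funext fun d => funext fun reg => pvStepA_eq d reg
    rw [List.foldl_map, hfe]
  have h2 : (regulations.map pvClassify).foldl pvStepB (pvMkDict [])
      = pvMkDict ((regulations.map pvClassify).foldl pvDedupStep []) := by
    apply pvFold_sim
    · exact List.nodup_nil
    · intro i hi; simp at hi
    · intro oi hoi i hoi'
      obtain ⟨reg, _, hreg⟩ := List.mem_map.mp hoi
      exact pvClassify_range reg i (hreg ▸ hoi')
  rw [h1]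
  have : pvMkDict [] = PySem.Dict.empty := rfl
  rw [← this, h2]
  rfl
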